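-- pv_equiv track=rewrite | github.com/CCamilaC/follow_the_gap | install/my_robot_test/lib/python3.12/site-packages/my_robot_test/test_follow_the_gap.py | form_gaps_from_disparities
-- ===== SOURCE A (Python) =====
-- def form_gaps_from_disparities(disparities, num_points):
--     boundary_indices = [0] + [d + 1 for d in disparities] + [num_points]
--     gaps = []
--     for i in range(len(boundary_indices) - 1):
--         start_idx = boundary_indices[i]
--         end_idx = boundary_indices[i + 1] - 1
--         gaps.append((start_idx, end_idx))
--     return gaps
-- ===== SOURCE B (Python) =====
-- def form_gaps_from_disparities(disparities, num_points):
--     gaps = []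
--     start = 0
--     for d in disparities:
--         gaps.append((start, d))
--         start = d + 1
--     gaps.append((start, num_points - 1))
--     return gaps
-- ===== Notes on version B (the rewrite author's own statement) =====
-- stated objective: simpler
-- what changed: B drops the intermediate boundary_indices table and the index scan over consecutive pairs; it threads a running 'start' accumulator over the disparities directly and appends the final gap (start, num_points-1) after the loop.
import Mathlib
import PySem

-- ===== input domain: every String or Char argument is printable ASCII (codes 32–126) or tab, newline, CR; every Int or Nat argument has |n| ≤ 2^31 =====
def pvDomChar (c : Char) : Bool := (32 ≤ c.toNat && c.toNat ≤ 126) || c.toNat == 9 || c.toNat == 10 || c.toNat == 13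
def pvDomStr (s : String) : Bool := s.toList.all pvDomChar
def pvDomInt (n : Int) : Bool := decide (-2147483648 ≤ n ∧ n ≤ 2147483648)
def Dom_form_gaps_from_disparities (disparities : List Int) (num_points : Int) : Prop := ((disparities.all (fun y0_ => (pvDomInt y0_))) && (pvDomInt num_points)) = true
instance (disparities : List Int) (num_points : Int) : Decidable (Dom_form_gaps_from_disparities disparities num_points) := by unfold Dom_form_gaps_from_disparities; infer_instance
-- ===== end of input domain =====

-- B replaces A's boundary_indices table and consecutive-pair index scan by a single
-- running 'start' accumulator over the disparities (objective: simpler).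

-- ===== PORT A =====
-- boundary_indices = [0] + [d + 1 for d in disparities] + [num_points];
-- for i in range(len(boundary_indices) - 1): gaps.append((b[i], b[i+1] - 1)).
-- Indices i, i+1 are always in range (the list has length ≥ 2), so pyGetD is exact here.
def form_gaps_from_disparities (disparities : List Int) (num_points : Int) : List (Int × Int) :=
  let boundary_indices : List Int := [0] ++ disparities.map (fun d => d + 1) ++ [num_points]
  (PySem.List.pyRange 0 ((boundary_indices.length : Int) - 1) 1).foldl
    (fun gaps i =>
      gaps ++ [(PySem.List.pyGetD boundary_indices i 0,
                PySem.List.pyGetD boundary_indices (i + 1) 0 - 1)]) []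

-- ===== PORT B =====
-- the loop of Source B: consume the disparities one by one, carrying the running start
def fgGo (num_points : Int) (start : Int) : List Int → List (Int × Int)
  | [] => [(start, num_points - 1)]
  | d :: rest => (start, d) :: fgGo num_points (d + 1) rest

def form_gaps_from_disparities_alt (disparities : List Int) (num_points : Int) : List (Int × Int) :=
  fgGo num_points 0 disparities

-- ===== PRECONDITION & SPEC =====
def Spec_form_gaps_from_disparities (disparities : List Int) (num_points : Int) (out : List (Int × Int)) : Prop := out = form_gaps_from_disparities_alt disparities num_points
instance (disparities : List Int) (num_points : Int) (out : List (Int × Int)) : Decidable (Spec_form_gaps_from_disparities disparities num_points out) := by unfold Spec_form_gaps_from_disparities; infer_instance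

-- ===== CLAIM (what is proved, stated in full; the proofs are below) =====
def Claim_equal_form_gaps_from_disparities : Prop := ∀ (disparities : List Int) (num_points : Int), Dom_form_gaps_from_disparities disparities num_points → Spec_form_gaps_from_disparities disparities num_points (form_gaps_from_disparities disparities num_points)

-- ===== LEMMAS AND PROOFS =====

-- consecutive pairs (x, y-1) of a list, the mathematical content of A's index scan
def fgPairs : List Int → List (Int × Int)
  | x :: y :: t => (x, y - 1) :: fgPairs (y :: t)
  | _ => []

theorem fg_foldl_append {α β : Type} (l : List α) (f : α → β) (acc : List β) :
    l.foldl (fun a i => a ++ [f i]) acc = acc ++ l.map f := by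
  induction l generalizing acc with
  | nil => simp
  | cons x xs ih => simp [List.foldl, ih, List.append_assoc]

theorem fg_getD_cons_succ (x : Int) (l : List Int) (k : Nat) :
    PySem.List.pyGetD (x :: l) ((k : Int) + 1) 0 = PySem.List.pyGetD l (k : Int) 0 := by
  rw [show ((k : Int) + 1) = ((k + 1 : Nat) : Int) by push_cast; ring]
  rw [PySem.List.pyGetD_natCast, PySem.List.pyGetD_natCast]
  simp [List.getD]

theorem fg_range_map_pairs (b : List Int) :
    (PySem.List.pyRange 0 ((b.length : Int) - 1) 1).map
      (fun i => (PySem.List.pyGetD b i 0, PySem.List.pyGetD b (i + 1) 0 - 1)) = fgPairs b := by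
  induction b with
  | nil => simp [fgPairs, PySem.List.pyRange_one_eq_nil]
  | cons x xs ih =>
    cases xs with
    | nil => simp [fgPairs, PySem.List.pyRange_one_eq_nil]
    | cons y t =>
      have hlen : (0 : Int) < ((x :: y :: t).length : Int) - 1 := by
        simp only [List.length_cons]; push_cast; omega
      rw [PySem.List.pyRange_one_cons hlen]
      have hshift : PySem.List.pyRange (0 + 1) (((x :: y :: t).length : Int) - 1) 1
          = (PySem.List.pyRange 0 (((y :: t).length : Int) - 1) 1).map (fun i => i + 1) := by
        rw [PySem.List.pyRange_one, PySem.List.pyRange_one]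
        have he : ((((x :: y :: t).length : Int) - 1) - (0 + 1)).toNat
            = ((((y :: t).length : Int) - 1) - 0).toNat := by
          simp [List.length_cons]
        rw [he, List.map_map]
        apply List.map_congr_left
        intro k _
        simp only [Function.comp_apply]
        omega
      rw [hshift, List.map_cons, List.map_map]
      have h0 : (PySem.List.pyGetD (x :: y :: t) 0 0, PySem.List.pyGetD (x :: y :: t) (0 + 1) 0 - 1)
          = (x, y - 1) := by
        have h1 := fg_getD_cons_succ x (y :: t) 0
        simp only [Nat.cast_zero, zero_add] at h1
        norm_num
        rw [h1]
        simp [PySem.List.pyGetD_zero_cons]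
      have hmap : ∀ i ∈ PySem.List.pyRange 0 (((y :: t).length : Int) - 1) 1,
          (PySem.List.pyGetD (x :: y :: t) (i + 1) 0,
           PySem.List.pyGetD (x :: y :: t) (i + 1 + 1) 0 - 1)
          = (PySem.List.pyGetD (y :: t) i 0, PySem.List.pyGetD (y :: t) (i + 1) 0 - 1) := by
        intro i hi
        rw [PySem.List.mem_pyRange_one] at hi
        obtain ⟨h1, h2⟩ := hi
        obtain ⟨k, rfl⟩ := Int.eq_ofNat_of_zero_le h1
        have hA := fg_getD_cons_succ x (y :: t) k
        have hB := fg_getD_cons_succ x (y :: t) (k + 1)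
        push_cast at hB
        rw [hA, hB]
      simp only [Function.comp_def]
      rw [List.map_congr_left hmap]
      rw [ih, h0]
      rfl

theorem fg_pairs_go (num_points : Int) (ds : List Int) (start : Int) :
    fgPairs (start :: (ds.map (fun d => d + 1) ++ [num_points])) = fgGo num_points start ds := by
  induction ds generalizing start with
  | nil => simp [fgPairs, fgGo]
  | cons d rest ih => simp [fgPairs, fgGo, ih]

-- ===== VERDICT (by name: the statement is the Claim_ definition above) =====
theorem form_gaps_from_disparities_spec : Claim_equal_form_gaps_from_disparities := by
  intro disparities num_points _
  unfold Spec_form_gaps_from_disparities form_gaps_from_disparities form_gaps_from_disparities_alt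
  rw [fg_foldl_append, List.nil_append, fg_range_map_pairs]
  simpa using fg_pairs_go num_points disparities 0
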